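-- pv_equiv track=rewrite | github.com/Ratnam12/DeepSearch | backend/research/state.py | remaining_phases_for
-- ===== SOURCE A (Python) =====
-- from typing import Any, Iterable, Optional
--
-- def remaining_phases_for(status: str) -> Iterable[str]:
--     """Yield the phases still to run after the given current status.
--
--     Used when resuming a crashed worker — start from the next phase
--     after whatever the run was doing when it died, not from the top.
--     """
--     timeline = ("scoping", "planning", "awaiting_approval", "researching", "writing", "done")
--     seen = False
--     for phase in timeline:
--         if phase == status:
--             seen = True
--             continue
--         if seen:
--             yield phase
-- ===== SOURCE B (Python) =====
-- def remaining_phases_for(status: str):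
--     """Yield the phases still to run after the given current status."""
--     timeline = ("scoping", "planning", "awaiting_approval", "researching", "writing", "done")
--     if status in timeline:
--         yield from timeline[timeline.index(status) + 1:]
-- ===== Notes on version B (the rewrite author's own statement) =====
-- stated objective: simpler
-- what changed: Replaced the flag-scan with a per-element seen branch by locate-then-emit: find the status's index and yield the tuple's tail slice after it (nothing if absent).
import Mathlib
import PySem

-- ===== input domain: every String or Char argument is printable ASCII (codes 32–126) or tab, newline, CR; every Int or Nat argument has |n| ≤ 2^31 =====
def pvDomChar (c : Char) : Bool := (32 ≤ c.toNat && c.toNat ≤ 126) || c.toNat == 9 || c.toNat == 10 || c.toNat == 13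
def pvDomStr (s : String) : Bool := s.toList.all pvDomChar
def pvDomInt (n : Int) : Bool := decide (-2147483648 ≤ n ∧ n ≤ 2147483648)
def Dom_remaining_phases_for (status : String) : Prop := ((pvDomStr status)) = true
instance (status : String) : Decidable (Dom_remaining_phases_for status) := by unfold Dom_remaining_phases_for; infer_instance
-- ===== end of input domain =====

-- B locates the status by index and returns the tail slice, instead of A's seen-flag scan; simpler decomposition, same values.
-- ===== PORT A =====
-- flag-scan: fold over the timeline carrying (seen, accumulated yields)
def remaining_phases_for (status : String) : List String :=
  let timeline := ["scoping", "planning", "awaiting_approval", "researching", "writing", "done"]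
  (timeline.foldl (fun (st : Bool × List String) phase =>
      if phase == status then (true, st.2)
      else if st.1 then (st.1, st.2 ++ [phase]) else st) (false, [])).2

-- ===== PORT B =====
-- locate-then-emit: timeline.index(status), then the slice timeline[idx+1:]
def remaining_phases_for_alt (status : String) : List String :=
  let timeline := ["scoping", "planning", "awaiting_approval", "researching", "writing", "done"]
  if timeline.contains status then
    match PySem.List.index? timeline status with
    | some i => PySem.List.slice timeline (some ((i : Int) + 1)) none
    | none => []
  else []

-- ===== PRECONDITION & SPEC =====
def Spec_remaining_phases_for (status : String) (out : List String) : Prop := out = remaining_phases_for_alt status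
instance (status : String) (out : List String) : Decidable (Spec_remaining_phases_for status out) := by unfold Spec_remaining_phases_for; infer_instance

-- ===== CLAIM (what is proved, stated in full; the proofs are below) =====
def Claim_equal_remaining_phases_for : Prop := ∀ (status : String), Dom_remaining_phases_for status → Spec_remaining_phases_for status (remaining_phases_for status)

-- ===== LEMMAS AND PROOFS =====

-- ===== VERDICT (by name: the statement is the Claim_ definition above) =====
theorem remaining_phases_for_spec : Claim_equal_remaining_phases_for := by
  intro status _
  unfold Spec_remaining_phases_for
  by_cases h1 : status = "scoping"; · subst h1; decide
  by_cases h2 : status = "planning"; · subst h2; decide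
  by_cases h3 : status = "awaiting_approval"; · subst h3; decide
  by_cases h4 : status = "researching"; · subst h4; decide
  by_cases h5 : status = "writing"; · subst h5; decide
  by_cases h6 : status = "done"; · subst h6; decide
  simp [remaining_phases_for, remaining_phases_for_alt, List.foldl,
    Ne.symm h1, Ne.symm h2, Ne.symm h3, Ne.symm h4, Ne.symm h5, Ne.symm h6,
    h1, h2, h3, h4, h5, h6]
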